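-- pv_equiv track=rewrite | github.com/JaminB/SmartTorrent-API | datafetch/searchbuilder.py | _thread_result_sort
-- ===== SOURCE A (Python) =====
-- def _thread_result_sort(rawResults, orderedURLList):
-- 	#Sort the results from all concurrent threads
-- 	results = []
-- 	unorderedURLs = []
-- 	unorderedContent = []
-- 	for rawResult in rawResults:
-- 		unorderedURLs.append(rawResult[1])
-- 		unorderedContent.append(rawResult[0])
-- 	orderedURLs = orderedURLList
-- 	for i in range(0,len(orderedURLs)):
-- 		for j in range(0, len(unorderedURLs)):
-- 			if orderedURLs[i] == unorderedURLs[j]: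
-- 				results.append(unorderedContent[j])
-- 	return results
-- ===== SOURCE B (Python) =====
-- def _thread_result_sort(rawResults, orderedURLList):
--     # Build an index url -> list of contents in appearance order, then emit
--     # the buckets in the order of orderedURLList (one pass + hash lookups).
--     index = {}
--     for content, url in rawResults:
--         index.setdefault(url, []).append(content)
--     results = []
--     for url in orderedURLList:
--         results.extend(index.get(url, []))
--     return results
-- ===== Notes on version B (the rewrite author's own statement) =====
-- stated objective: faster
-- what changed: Replaces A's nested scan (for each ordered URL, rescan all raw results) by building a url->contents bucket index in one pass over rawResults and then concatenating the buckets in ordered-URL order.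
import Mathlib
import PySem

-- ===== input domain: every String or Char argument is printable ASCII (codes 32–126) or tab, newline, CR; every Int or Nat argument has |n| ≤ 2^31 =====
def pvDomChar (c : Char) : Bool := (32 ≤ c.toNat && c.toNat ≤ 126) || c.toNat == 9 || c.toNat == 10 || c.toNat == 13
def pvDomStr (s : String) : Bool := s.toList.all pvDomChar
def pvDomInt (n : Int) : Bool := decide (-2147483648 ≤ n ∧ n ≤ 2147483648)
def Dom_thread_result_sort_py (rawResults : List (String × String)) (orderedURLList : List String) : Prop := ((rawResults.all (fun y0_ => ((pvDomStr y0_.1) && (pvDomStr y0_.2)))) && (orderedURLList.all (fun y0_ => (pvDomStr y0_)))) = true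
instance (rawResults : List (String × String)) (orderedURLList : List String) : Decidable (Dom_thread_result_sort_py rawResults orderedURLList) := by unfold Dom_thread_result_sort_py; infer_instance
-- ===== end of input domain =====

-- B replaces A's nested rescan with a one-pass url->contents index, then emits
-- buckets in ordered-URL order (faster; return-value equivalence).
-- ===== PORT A =====
def thread_result_sort_py (rawResults : List (String × String)) (orderedURLList : List String) : List String :=
  -- results = []; unorderedURLs = []; unorderedContent = []; for rawResult in rawResults: ...
  let st := rawResults.foldl
    (fun (st : List String × List String) rawResult => (st.1 ++ [rawResult.2], st.2 ++ [rawResult.1]))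
    ([], [])
  let unorderedURLs := st.1
  let unorderedContent := st.2
  let orderedURLs := orderedURLList
  -- for i in range(0, len(orderedURLs)): for j in range(0, len(unorderedURLs)): ...
  (PySem.List.pyRange 0 (PySem.List.len orderedURLs) 1).foldl
    (fun results i =>
      (PySem.List.pyRange 0 (PySem.List.len unorderedURLs) 1).foldl
        (fun results j =>
          if PySem.List.pyGetD orderedURLs i "" == PySem.List.pyGetD unorderedURLs j "" then
            results ++ [PySem.List.pyGetD unorderedContent j ""]
          else results)
        results)
    []

-- ===== PORT B =====
def thread_result_sort_py_alt (rawResults : List (String × String)) (orderedURLList : List String) : List String :=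
  -- index = {}; for content, url in rawResults: index.setdefault(url, []).append(content)
  let index : PySem.Dict String (List String) :=
    rawResults.foldl (fun d r => d.modify r.2 [] (fun cs => cs ++ [r.1])) PySem.Dict.empty
  -- results = []; for url in orderedURLList: results.extend(index.get(url, []))
  orderedURLList.foldl (fun results url => results ++ index.getD url []) []

-- ===== PRECONDITION & SPEC =====
def Spec_thread_result_sort_py (rawResults : List (String × String)) (orderedURLList : List String) (out : List String) : Prop := out = thread_result_sort_py_alt rawResults orderedURLList
instance (rawResults : List (String × String)) (orderedURLList : List String) (out : List String) : Decidable (Spec_thread_result_sort_py rawResults orderedURLList out) := by unfold Spec_thread_result_sort_py; infer_instance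

-- ===== CLAIM =====
def Claim_equal_thread_result_sort_py : Prop := ∀ (rawResults : List (String × String)) (orderedURLList : List String), Dom_thread_result_sort_py rawResults orderedURLList → Spec_thread_result_sort_py rawResults orderedURLList (thread_result_sort_py rawResults orderedURLList)

-- ===== LEMMAS AND PROOFS =====
-- A's first loop just unzips rawResults.
theorem pv_unzip (raw : List (String × String)) (a b : List String) :
    raw.foldl (fun (st : List String × List String) r => (st.1 ++ [r.2], st.2 ++ [r.1])) (a, b)
      = (a ++ raw.map Prod.snd, b ++ raw.map Prod.fst) := by
  induction raw generalizing a b with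
  | nil => simp
  | cons r raw ih => simp [List.foldl, ih]

-- B's index: the bucket of u collects, in order, the contents paired with u.
theorem pv_index_getD (raw : List (String × String)) (d : PySem.Dict String (List String)) (u : String) :
    (raw.foldl (fun d r => d.modify r.2 [] (fun cs => cs ++ [r.1])) d).getD u []
      = d.getD u [] ++ (raw.filter (fun r => r.2 == u)).map Prod.fst := by
  induction raw generalizing d with
  | nil => simp
  | cons r raw ih =>
    simp only [List.foldl, ih, List.filter]
    by_cases h : r.2 = u
    · subst h; simp [PySem.Dict.getD_modify_self]
    · rw [PySem.Dict.getD_modify_of_ne]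
      · have hb : (r.2 == u) = false := by simp [h]
        simp [hb]
      · exact fun e => h e.symm

theorem thread_result_sort_py_eq (raw : List (String × String)) (ord : List String) :
    thread_result_sort_py raw ord
      = ord.foldl (fun results u => results ++ (raw.filter (fun r => r.2 == u)).map Prod.fst) [] := by
  unfold thread_result_sort_py
  rw [pv_unzip]
  simp only [List.nil_append]
  have h2 : ∀ (results : List String) (u : String),
      (PySem.List.pyRange 0 (PySem.List.len (raw.map Prod.snd)) 1).foldl
        (fun results j =>
          if u == PySem.List.pyGetD (raw.map Prod.snd) j "" then
            results ++ [PySem.List.pyGetD (raw.map Prod.fst) j ""]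
          else results)
        results
      = results ++ (raw.filter (fun r => r.2 == u)).map Prod.fst := by
    intro results u
    have hmap : ∀ j : Int,
        PySem.List.pyGetD (raw.map Prod.snd) j "" = (PySem.List.pyGetD raw j ("", "")).2 :=
      fun j => PySem.List.pyGetD_map Prod.snd raw j ("", "")
    have hmap1 : ∀ j : Int,
        PySem.List.pyGetD (raw.map Prod.fst) j "" = (PySem.List.pyGetD raw j ("", "")).1 :=
      fun j => PySem.List.pyGetD_map Prod.fst raw j ("", "")
    have hlen : PySem.List.len (raw.map Prod.snd) = PySem.List.len raw := by
      simp [PySem.List.len_eq]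
    calc (PySem.List.pyRange 0 (PySem.List.len (raw.map Prod.snd)) 1).foldl
            (fun results j =>
              if u == PySem.List.pyGetD (raw.map Prod.snd) j "" then
                results ++ [PySem.List.pyGetD (raw.map Prod.fst) j ""]
              else results) results
        = (PySem.List.pyRange 0 (PySem.List.len raw) 1).foldl
            (fun results j =>
              (fun acc (r : String × String) => if u == r.2 then acc ++ [r.1] else acc)
                results (PySem.List.pyGetD raw j ("", ""))) results := by
            rw [hlen]
            apply PySem.List.foldl_congr_mem
            intro acc j _
            rw [hmap, hmap1]
      _ = raw.foldl (fun acc r => if u == r.2 then acc ++ [r.1] else acc) results :=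
            PySem.List.foldl_pyRange_zero_pyGetD raw ("", "")
              (fun acc r => if u == r.2 then acc ++ [r.1] else acc) results
      _ = results ++ (raw.filter (fun r => u == r.2)).map Prod.fst :=
            PySem.List.foldl_append_if (fun r => u == r.2) Prod.fst raw results
      _ = results ++ (raw.filter (fun r => r.2 == u)).map Prod.fst := by
            congr 1
            apply congrArg
            apply List.filter_congr
            intro r _
            simp [eq_comm]
  calc (PySem.List.pyRange 0 (PySem.List.len ord) 1).foldl
          (fun results i =>
            (PySem.List.pyRange 0 (PySem.List.len (raw.map Prod.snd)) 1).foldl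
              (fun results j =>
                if PySem.List.pyGetD ord i "" == PySem.List.pyGetD (raw.map Prod.snd) j "" then
                  results ++ [PySem.List.pyGetD (raw.map Prod.fst) j ""]
                else results)
              results)
          []
      = (PySem.List.pyRange 0 (PySem.List.len ord) 1).foldl
          (fun results i =>
            (fun acc u => acc ++ (raw.filter (fun r => r.2 == u)).map Prod.fst)
              results (PySem.List.pyGetD ord i "")) [] := by
          apply PySem.List.foldl_congr_mem
          intro acc i _
          exact h2 acc _
    _ = ord.foldl (fun results u => results ++ (raw.filter (fun r => r.2 == u)).map Prod.fst) [] :=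
          PySem.List.foldl_pyRange_zero_pyGetD ord ""
            (fun acc u => acc ++ (raw.filter (fun r => r.2 == u)).map Prod.fst) []

theorem thread_result_sort_py_alt_eq (raw : List (String × String)) (ord : List String) :
    thread_result_sort_py_alt raw ord
      = ord.foldl (fun results u => results ++ (raw.filter (fun r => r.2 == u)).map Prod.fst) [] := by
  unfold thread_result_sort_py_alt
  apply PySem.List.foldl_congr_mem
  intro acc u _
  rw [pv_index_getD]
  simp

-- ===== VERDICT =====
theorem thread_result_sort_py_spec : Claim_equal_thread_result_sort_py := by
  intro raw ord _
  unfold Spec_thread_result_sort_py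
  rw [thread_result_sort_py_eq, thread_result_sort_py_alt_eq]
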